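-- pv_equiv track=rewrite | github.com/prog4biol/pfb2019 | problemsets/answers/PSPython_09-02_JVB.py | fold_sequence
-- ===== SOURCE A (Python) =====
-- def fold_sequence(linear_sequence):
--     # There are a couple of ways of solving this
--     # problem; it can be done with a regex or
--     # by string slicing (which is the approach
--     # favored below). The idea is to "slide" a
--     # non-overlapping window over the sequence
--     # and output the subsequences 60 bp long:
--     #
--     # subseq:   line1  line2  line3
--     #    beg:   0      60     120
--     #           |------|------|------|
--     #           GCATCGTAGCTTATCTCG
--     # result:
--     #           GCATCGT
--     #           AGCTTAT
--     #           CTCG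
--     #
--     # In order to re-fold an sequence, we must first
--     # un-fold it (make it linear) by deleting the
--     # "\n" chars:
--     linear_sequence = linear_sequence.replace('\n', '')
--
--     # store sub-sequences in a temporary list:
--     folded_sequence = []
--     linear_sequence_length = len(linear_sequence)
--     # Using the `range()` function, we can iterate over
--     # the sequence, from 0 to the en of the sequence,
--     # incrementing by 60:
--     for beg in range(0, linear_sequence_length, 60):
--         end = beg + 60  # end of line subsequence
--
--         folded_sequence.append(linear_sequence[beg:end])
--
--     return '\n'.join(folded_sequence)
-- ===== SOURCE B (Python) =====
-- def fold_sequence(linear_sequence):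
--     # Single per-character pass with a line-length counter instead of
--     # an index loop over 60-wide slices.
--     s = linear_sequence.replace('\n', '')
--     out = []
--     count = 0
--     for ch in s:
--         if count == 60:
--             out.append('\n')
--             count = 0
--         out.append(ch)
--         count += 1
--     return ''.join(out)
-- ===== Notes on version B (the rewrite author's own statement) =====
-- stated objective: alternative
-- what changed: Replaces the range(0,len,60) slicing loop that collects 60-char chunks and joins them with a single per-character pass that emits a newline whenever a line-length counter reaches 60.
import Mathlib
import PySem

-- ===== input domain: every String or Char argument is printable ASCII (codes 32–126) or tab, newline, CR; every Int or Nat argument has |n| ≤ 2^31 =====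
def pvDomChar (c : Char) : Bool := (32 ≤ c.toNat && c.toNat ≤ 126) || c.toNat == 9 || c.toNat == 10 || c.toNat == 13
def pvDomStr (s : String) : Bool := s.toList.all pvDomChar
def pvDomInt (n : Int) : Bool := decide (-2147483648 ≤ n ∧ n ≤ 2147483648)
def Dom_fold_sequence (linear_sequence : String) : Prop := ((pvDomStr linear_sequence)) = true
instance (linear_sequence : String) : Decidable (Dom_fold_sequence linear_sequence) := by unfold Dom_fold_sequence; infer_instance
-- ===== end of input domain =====

-- B replaces A's range(0,len,60) slice-and-join loop by a single per-character pass
-- with a line-length counter (objective: alternative, same O(n) cost).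

-- ===== PORT A =====
def fold_sequence (linear_sequence : String) : String :=
  let ls := PySem.Str.replace linear_sequence "\n" ""
  let linear_sequence_length := PySem.Str.len ls
  let folded_sequence :=
    (PySem.List.pyRange 0 linear_sequence_length 60).foldl
      (fun acc beg =>
        let «end» := beg + 60
        acc ++ [PySem.Str.slice ls (some beg) (some «end»)])
      ([] : List String)
  PySem.Str.join "\n" folded_sequence

-- ===== PORT B =====
def fold_sequence_alt (linear_sequence : String) : String :=
  let s := PySem.Str.replace linear_sequence "\n" ""
  let r := s.toList.foldl
    (fun (st : List Char × Int) ch =>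
      if st.2 = 60 then (st.1 ++ ['\n'] ++ [ch], 0 + 1)
      else (st.1 ++ [ch], st.2 + 1))
    (([] : List Char), (0 : Int))
  String.ofList r.1

-- ===== PRECONDITION & SPEC =====
def Spec_fold_sequence (linear_sequence : String) (out : String) : Prop := out = fold_sequence_alt linear_sequence
instance (linear_sequence : String) (out : String) : Decidable (Spec_fold_sequence linear_sequence out) := by unfold Spec_fold_sequence; infer_instance

-- ===== CLAIM (what is proved, stated in full; the proofs are below) =====
def Claim_equal_fold_sequence : Prop := ∀ (linear_sequence : String), Dom_fold_sequence linear_sequence → Spec_fold_sequence linear_sequence (fold_sequence linear_sequence)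

-- ===== LEMMAS AND PROOFS =====

-- the folded text as a list of chars: common reference shape for both ports
def chunksJoin (t : List Char) : List Char :=
  if _h : t.length ≤ 60 then t
  else t.take 60 ++ '\n' :: chunksJoin (t.drop 60)
termination_by t.length
decreasing_by simp; omega

-- B's step function (the port's lambda, named for the proofs)
def bStep (st : List Char × Int) (ch : Char) : List Char × Int :=
  if st.2 = 60 then (st.1 ++ ['\n'] ++ [ch], 0 + 1)
  else (st.1 ++ [ch], st.2 + 1)

lemma bFill (u : List Char) : ∀ (acc : List Char) (c : Int), 0 ≤ c → c + u.length ≤ 60 →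
    u.foldl bStep (acc, c) = (acc ++ u, c + u.length) := by
  induction u with
  | nil => intro acc c _ _; simp
  | cons ch rest ih =>
    intro acc c hc hle
    simp only [List.length_cons] at hle
    have hne : c ≠ 60 := by push_cast at hle; omega
    simp only [List.foldl_cons, bStep, if_neg hne]
    rw [ih (acc ++ [ch]) (c + 1) (by omega) (by push_cast at hle ⊢; omega)]
    simp; omega

lemma bMain (n : Nat) : ∀ (t : List Char), t.length ≤ n → ∀ (acc : List Char),
    (t.foldl bStep (acc, 0)).1 = acc ++ chunksJoin t := by
  induction n using Nat.strong_induction_on with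
  | _ n ih =>
    intro t hn acc
    by_cases h : t.length ≤ 60
    · rw [bFill t acc 0 le_rfl (by omega)]
      rw [chunksJoin, dif_pos h]
    · have hsplit : t = t.take 60 ++ t.drop 60 := (List.take_append_drop 60 t).symm
      rw [chunksJoin, dif_neg h]
      conv_lhs => rw [hsplit]
      rw [List.foldl_append,
        bFill (t.take 60) acc 0 le_rfl (by push_cast [List.length_take]; omega)]
      have hlen : (0 : Int) + ((t.take 60).length : Int) = 60 := by simp; omega
      rw [hlen]
      obtain ⟨ch, rest, hdr⟩ : ∃ ch rest, t.drop 60 = ch :: rest := by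
        cases hd : t.drop 60 with
        | nil => exfalso; have := congrArg List.length hd; simp at this; omega
        | cons a b => exact ⟨a, b, rfl⟩
      have step60 : (t.drop 60).foldl bStep (acc ++ t.take 60, (60 : Int)) =
          (t.drop 60).foldl bStep (acc ++ t.take 60 ++ ['\n'], 0) := by
        rw [hdr]
        simp only [List.foldl_cons, bStep]
        norm_num
      rw [step60, ih (t.drop 60).length (by simp; omega) (t.drop 60) le_rfl]
      simp

lemma pyRange60_cons (a b : Int) (h : a < b) :
    PySem.List.pyRange a b 60 = a :: PySem.List.pyRange (a + 60) b 60 := by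
  rw [PySem.List.pyRange_of_pos a b (by norm_num),
      PySem.List.pyRange_of_pos (a + 60) b (by norm_num)]
  rw [if_pos h]
  by_cases h2 : a + 60 < b
  · rw [if_pos h2]
    have hm : ((b - a + 60 - 1) / 60).toNat = ((b - (a + 60) + 60 - 1) / 60).toNat + 1 := by
      omega
    rw [hm, List.range_succ_eq_map]
    simp only [List.map_cons, List.map_map]
    congr 1
    · norm_num
    · apply List.map_congr_left
      intro k _
      simp only [Function.comp]
      push_cast
      ring
  · rw [if_neg h2]
    have hm : ((b - a + 60 - 1) / 60).toNat = 1 := by omega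
    rw [hm]
    simp

lemma pyRange60_nil (a b : Int) (h : b ≤ a) : PySem.List.pyRange a b 60 = [] := by
  rw [PySem.List.pyRange_of_pos a b (by norm_num), if_neg (by omega)]
  simp

-- A's chunk list over a list of chars
def aChunks (t : List Char) : List (List Char) :=
  (PySem.List.pyRange 0 (t.length : Int) 60).map
    (fun beg => PySem.List.slice t (some beg) (some (beg + 60)))

lemma aChunks_step (t : List Char) (h : ¬ t.length ≤ 60) :
    aChunks t = t.take 60 :: aChunks (t.drop 60) := by
  unfold aChunks
  rw [pyRange60_cons 0 (t.length : Int) (by omega)]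
  simp only [List.map_cons, zero_add]
  congr 1
  · rw [PySem.List.slice_toNat t (by norm_num) (by norm_num)]
    simp
  · rw [PySem.List.pyRange_of_pos 60 (t.length : Int) (by norm_num),
        PySem.List.pyRange_of_pos 0 (((t.drop 60).length : Nat) : Int) (by norm_num)]
    have hdl : (((t.drop 60).length : Nat) : Int) = (t.length : Int) - 60 := by
      push_cast [List.length_drop]; omega
    rw [hdl, if_pos (by omega), if_pos (by omega)]
    have hcnt : (((t.length : Int) - 60 - 0 + 60 - 1) / 60).toNat
        = (((t.length : Int) - 60 + 60 - 1) / 60).toNat := by omega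
    rw [hcnt, List.map_map, List.map_map]
    apply List.map_congr_left
    intro k _
    simp only [Function.comp]
    rw [PySem.List.slice_toNat t (by positivity) (by positivity),
        PySem.List.slice_toNat (t.drop 60) (by positivity) (by positivity),
        List.drop_drop]
    have e1 : ((60 : Int) + 60 * (k : Int)).toNat = 60 + 60 * k := by omega
    have e2 : ((60 : Int) + 60 * (k : Int) + 60).toNat = 60 + 60 * k + 60 := by omega
    have e3 : ((0 : Int) + 60 * (k : Int)).toNat = 60 * k := by omega
    have e4 : ((0 : Int) + 60 * (k : Int) + 60).toNat = 60 * k + 60 := by omega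
    rw [e1, e2, e3, e4]
    congr 1
    omega

lemma aMain (n : Nat) : ∀ (t : List Char), t.length ≤ n →
    PySem.Chars.join ['\n'] (aChunks t) = chunksJoin t := by
  induction n using Nat.strong_induction_on with
  | _ n ih =>
    intro t hn
    by_cases h : t.length ≤ 60
    · rw [chunksJoin, dif_pos h]
      by_cases h0 : t.length = 0
      · unfold aChunks
        rw [show ((t.length : Nat) : Int) = 0 by omega, pyRange60_nil 0 0 le_rfl]
        simp only [List.map_nil, PySem.Chars.join_nil]
        exact (List.eq_nil_of_length_eq_zero h0).symm
      · unfold aChunks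
        rw [pyRange60_cons 0 (t.length : Int) (by omega)]
        simp only [zero_add]
        rw [pyRange60_nil 60 (t.length : Int) (by omega)]
        simp only [List.map_cons, List.map_nil]
        rw [PySem.List.slice_toNat t (by norm_num) (by norm_num)]
        norm_num
        exact h
    · rw [chunksJoin, dif_neg h, aChunks_step t h]
      have h2 : ¬ (t.drop 60).length = 0 := by simp; omega
      obtain ⟨q, rest, hq⟩ : ∃ q rest, aChunks (t.drop 60) = q :: rest := by
        unfold aChunks
        rw [pyRange60_cons 0 ((t.drop 60).length : Int) (by omega)]
        exact ⟨_, _, rfl⟩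
      rw [hq, PySem.Chars.join_cons_cons, ← hq,
          ih (t.drop 60).length (by simp; omega) (t.drop 60) le_rfl]
      simp

-- ===== VERDICT (by name: the statement is the Claim_ definition above) =====
set_option maxHeartbeats 1000000 in
theorem fold_sequence_spec : Claim_equal_fold_sequence := by
  intro s _
  unfold Spec_fold_sequence
  apply String.toList_inj.mp
  simp only [fold_sequence, fold_sequence_alt]
  rw [show (fun (st : List Char × Int) ch =>
      if st.2 = 60 then (st.1 ++ ['\n'] ++ [ch], (0 : Int) + 1)
      else (st.1 ++ [ch], st.2 + 1)) = bStep from rfl]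
  rw [String.toList_ofList,
      bMain (PySem.Str.replace s "\n" "").toList.length _ le_rfl []]
  rw [PySem.List.foldl_append_singleton_eq_map, List.nil_append]
  rw [PySem.Str.toList_join, List.map_map]
  rw [← aMain (PySem.Str.replace s "\n" "").toList.length _ le_rfl]
  unfold aChunks
  rw [PySem.Str.len_eq]
  rw [List.nil_append, show "\n".toList = ['\n'] from rfl]
  congr 1
  apply List.map_congr_left
  intro beg _
  simp [PySem.Str.toList_slice, PySem.Chars.slice_eq_listSlice]
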